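-- pv_equiv track=rewrite | github.com/MiMickyyy/Noroantibody | scripts/rerank_af3_with_rf2.py | _residue_counts_from_atom_lines
-- ===== SOURCE A (Python) =====
-- from typing import Dict, List, Optional, Sequence, Tuple
--
-- def _parse_atom_residue_key(line: str) -> Tuple[str, str, str]:
--     chain = line[21] if len(line) > 21 else " "
--     resseq = line[22:26] if len(line) > 25 else "    "
--     icode = line[26] if len(line) > 26 else " "
--     return chain, resseq, icode
--
-- def _residue_counts_from_atom_lines(lines: Sequence[str]) -> Dict[str, int]:
--     counts: Dict[str, int] = {}
--     seen = set()
--     for line in lines: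
--         if not line.startswith("ATOM"):
--             continue
--         chain, resseq, icode = _parse_atom_residue_key(line)
--         key = (chain, resseq, icode)
--         if key in seen:
--             continue
--         seen.add(key)
--         counts[chain] = counts.get(chain, 0) + 1
--     return counts
-- ===== SOURCE B (Python) =====
-- from typing import Dict, List, Optional, Sequence, Tuple
--
-- def _parse_atom_residue_key(line: str) -> Tuple[str, str, str]:
--     chain = line[21] if len(line) > 21 else " "
--     resseq = line[22:26] if len(line) > 25 else "    "
--     icode = line[26] if len(line) > 26 else " "
--     return chain, resseq, icode
--
-- def _residue_counts_from_atom_lines(lines: Sequence[str]) -> Dict[str, int]: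
--     keys = [_parse_atom_residue_key(line) for line in lines if line.startswith("ATOM")]
--     chains = [chain for chain, _resseq, _icode in dict.fromkeys(keys)]
--     return {chain: chains.count(chain) for chain in dict.fromkeys(chains)}
-- ===== Notes on version B (the rewrite author's own statement) =====
-- stated objective: simpler
-- what changed: B is a staged comprehension pipeline: collect residue keys from ATOM lines, ordered-dedup them with dict.fromkeys, project the chain ids, and build the result by counting each distinct chain with list.count, instead of A's single loop maintaining a global seen-set with a dedup branch and an incrementally updated counter dict.
import Mathlib
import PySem

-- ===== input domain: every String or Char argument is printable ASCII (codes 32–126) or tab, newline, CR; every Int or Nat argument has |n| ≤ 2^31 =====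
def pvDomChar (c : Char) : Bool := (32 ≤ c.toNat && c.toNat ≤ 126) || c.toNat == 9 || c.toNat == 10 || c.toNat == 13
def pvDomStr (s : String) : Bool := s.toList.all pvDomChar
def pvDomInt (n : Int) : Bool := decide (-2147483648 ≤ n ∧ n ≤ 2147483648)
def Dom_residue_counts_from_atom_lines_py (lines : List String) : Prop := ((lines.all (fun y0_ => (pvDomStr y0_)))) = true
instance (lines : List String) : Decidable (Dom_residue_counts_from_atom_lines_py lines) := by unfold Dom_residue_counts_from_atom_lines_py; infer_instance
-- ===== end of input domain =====

-- B replaces A's single loop (global seen-set + incrementally updated counter dict) by a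
-- staged pipeline: keys of ATOM lines, ordered dedup, then count each distinct chain; same
-- result, plainer and shorter.

-- ===== PORT A =====
-- shared helper: Python _parse_atom_residue_key (identical in Source A and Source B).
-- line[21] / line[26] under the 'len(line) > …' guard are in range, so List.getD is exact;
-- line[22:26] is PySem.List.slice.
def parse_atom_residue_key_py (line : String) : String × String × String :=
  let cs := line.toList
  (if 21 < cs.length then String.ofList [cs.getD 21 ' '] else " ",
   if 25 < cs.length then String.ofList (PySem.List.slice cs (some 22) (some 26)) else "    ",
   if 26 < cs.length then String.ofList [cs.getD 26 ' '] else " ")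

def residue_counts_from_atom_lines_py (lines : List String) : List (String × Int) :=
  let st := lines.foldl
    (fun (st : PySem.Dict String Int × PySem.Set (String × String × String)) line =>
      if PySem.Str.startswith line "ATOM" then
        let key := parse_atom_residue_key_py line
        if PySem.Set.contains st.2 key then st
        else (st.1.insert key.1 (st.1.getD key.1 0 + 1), PySem.Set.add st.2 key)
      else st)
    (PySem.Dict.empty, PySem.Set.empty)
  st.1.items

-- ===== PORT B =====
def residue_counts_from_atom_lines_py_alt (lines : List String) : List (String × Int) :=
  let keys := (lines.filter (fun l => PySem.Str.startswith l "ATOM")).map parse_atom_residue_key_py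
  let chains := (PySem.List.dedup keys).map (fun k => k.1)
  (PySem.List.dedup chains).map (fun ch => (ch, (chains.count ch : Int)))

-- ===== PRECONDITION & SPEC =====
def Spec_residue_counts_from_atom_lines_py (lines : List String) (out : List (String × Int)) : Prop := out = residue_counts_from_atom_lines_py_alt lines
instance (lines : List String) (out : List (String × Int)) : Decidable (Spec_residue_counts_from_atom_lines_py lines out) := by unfold Spec_residue_counts_from_atom_lines_py; infer_instance

-- ===== CLAIM (what is proved, stated in full; the proofs are below) =====
def Claim_equal_residue_counts_from_atom_lines_py : Prop := ∀ (lines : List String), Dom_residue_counts_from_atom_lines_py lines → Spec_residue_counts_from_atom_lines_py lines (residue_counts_from_atom_lines_py lines)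

-- ===== LEMMAS AND PROOFS =====

-- A's fold step, written over the parsed key (= A's body on an ATOM line)
def pvStepK (st : PySem.Dict String Int × PySem.Set (String × String × String))
    (key : String × String × String) :
    PySem.Dict String Int × PySem.Set (String × String × String) :=
  if PySem.Set.contains st.2 key then st
  else (st.1.insert key.1 (st.1.getD key.1 0 + 1), PySem.Set.add st.2 key)

-- A's fold over the raw lines is the fold of pvStepK over the parsed keys of the ATOM lines
lemma pv_fold_lines_eq (lines : List String)
    (st : PySem.Dict String Int × PySem.Set (String × String × String)) :
    lines.foldl
      (fun st line =>
        if PySem.Str.startswith line "ATOM" then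
          let key := parse_atom_residue_key_py line
          if PySem.Set.contains st.2 key then st
          else (st.1.insert key.1 (st.1.getD key.1 0 + 1), PySem.Set.add st.2 key)
        else st)
      st
    = ((lines.filter (fun l => PySem.Str.startswith l "ATOM")).map
        parse_atom_residue_key_py).foldl pvStepK st := by
  induction lines generalizing st with
  | nil => rfl
  | cons l ls ih =>
    by_cases h : PySem.Str.startswith l "ATOM"
    · simp only [List.foldl_cons, List.filter_cons, h, if_pos, List.map_cons]
      rw [ih]; rfl
    · simp only [List.foldl_cons, List.filter_cons, h]
      simpa using ih st

-- the counts dict built by A's interleaved inserts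
def pvF (chains : List String) : PySem.Dict String Int :=
  chains.foldl (fun d x => d.insert x (d.getD x 0 + 1)) PySem.Dict.empty

lemma pv_invariant (ks : List (String × String × String))
    (s : PySem.Set (String × String × String)) :
    ks.foldl pvStepK (pvF (s.map Prod.fst), s)
      = (pvF ((PySem.Set.update s ks).map Prod.fst), PySem.Set.update s ks) := by
  induction ks generalizing s with
  | nil => rfl
  | cons k rest ih =>
    rw [List.foldl_cons, PySem.Set.update_cons]
    by_cases hk : k ∈ s
    · have h1 : pvStepK (pvF (s.map Prod.fst), s) k = (pvF (s.map Prod.fst), s) := by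
        unfold pvStepK
        rw [if_pos ((PySem.Set.contains_iff _ _).2 hk)]
      rw [h1, PySem.Set.add_of_mem hk, ih]
    · have h1 : pvStepK (pvF (s.map Prod.fst), s) k
          = (pvF ((s ++ [k]).map Prod.fst), s ++ [k]) := by
        unfold pvStepK
        rw [if_neg (fun hc => hk ((PySem.Set.contains_iff _ _).1 hc))]
        have : pvF ((s ++ [k]).map Prod.fst)
            = (pvF (s.map Prod.fst)).insert k.1 ((pvF (s.map Prod.fst)).getD k.1 0 + 1) := by
          unfold pvF
          rw [List.map_append, List.foldl_append]
          rfl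
        rw [this, PySem.Set.add_of_not_mem hk]
      rw [h1, PySem.Set.add_of_not_mem hk, ih]

-- ===== VERDICT (by name: the statement is the Claim_ definition above) =====
theorem residue_counts_from_atom_lines_py_spec : Claim_equal_residue_counts_from_atom_lines_py := by
  intro lines _
  show residue_counts_from_atom_lines_py lines = residue_counts_from_atom_lines_py_alt lines
  unfold residue_counts_from_atom_lines_py residue_counts_from_atom_lines_py_alt
  rw [pv_fold_lines_eq]
  set ks := (lines.filter (fun l => PySem.Str.startswith l "ATOM")).map
    parse_atom_residue_key_py with hks
  have h0 : (PySem.Dict.empty, (PySem.Set.empty : PySem.Set (String × String × String)))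
      = (pvF ((PySem.Set.empty : PySem.Set (String × String × String)).map Prod.fst),
         (PySem.Set.empty : PySem.Set (String × String × String))) := rfl
  rw [h0, pv_invariant ks PySem.Set.empty]
  have hupd : PySem.Set.update (PySem.Set.empty : PySem.Set (String × String × String)) ks
      = PySem.Set.ofList ks := PySem.Set.update_empty ks
  rw [hupd]
  have hded : PySem.List.dedup ks = PySem.Set.ofList ks := PySem.List.dedup_eq_ofList ks
  show (pvF ((PySem.Set.ofList ks).map Prod.fst)).items
      = (PySem.List.dedup ((PySem.List.dedup ks).map Prod.fst)).map
          (fun ch => (ch, (((PySem.List.dedup ks).map Prod.fst).count ch : Int)))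
  rw [hded]
  set chains := (PySem.Set.ofList ks).map Prod.fst with hchains
  have hcounter : pvF chains = PySem.Dict.counter chains :=
    PySem.Dict.foldl_insert_getD_add_one_eq_counter chains
  rw [hcounter, PySem.Dict.items_counter, PySem.List.dedup_eq_ofList]
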